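-- pv_equiv track=rewrite | github.com/Rachel1477/clean_tiao_zhan_bei | src/valid.py | evaluate_track
-- ===== SOURCE A (Python) =====
-- def evaluate_track(true_label, pred_label_sequence):
--     """
--     根据比赛规则评估单个航迹的预测序列。
--
--     返回:
--     effective_point (int): 有效点编号 (从1开始)。
--     final_correct (bool): 最终预测是否正确。
--     """
--     # 最终预测是否正确
--     final_correct = (pred_label_sequence[-1] == true_label)
--
--     # 计算有效点
--     last_error_idx = -1
--     for i, pred in enumerate(pred_label_sequence):
--         if pred != true_label:
--             last_error_idx = i
--
--     # 如果从未犯错，有效点是1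
--     if last_error_idx == -1:
--         effective_point = 1
--     else:
--         # 寻找最后一个错误后的第一个正确点
--         first_correct_after_last_error_idx = -1
--         for i in range(last_error_idx + 1, len(pred_label_sequence)):
--             if pred_label_sequence[i] == true_label:
--                 first_correct_after_last_error_idx = i
--                 break
--
--         if first_correct_after_last_error_idx != -1:
--             effective_point = first_correct_after_last_error_idx + 1 # 点的编号从1开始
--         else:
--             # 如果最后一个错误之后再也没有正确过，则判定为失败
--             effective_point = len(pred_label_sequence) + 1 # 标记为失败
--
--     return effective_point, final_correct
-- ===== SOURCE B (Python) =====
-- def evaluate_track(true_label, pred_label_sequence):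
--     """
--     根据比赛规则评估单个航迹的预测序列。(single reverse scan with early exit)
--     """
--     final_correct = (pred_label_sequence[-1] == true_label)
--
--     # scan from the end for the last wrong prediction
--     last_error = -1
--     for i, pred in reversed(list(enumerate(pred_label_sequence))):
--         if pred != true_label:
--             last_error = i
--             break
--
--     # first correct point after the last error is always last_error + 1
--     # (or the len+1 failure sentinel when the last point itself is wrong)
--     effective_point = 1 if last_error == -1 else last_error + 2
--     return effective_point, final_correct
-- ===== Notes on version B (the rewrite author's own statement) =====
-- stated objective: simpler
-- what changed: One reverse scan with early exit replaces A's full forward scan plus a second forward search; the effective point collapses to the single expression last_error + 2 (with 1 when there is no error), which also covers the len+1 failure sentinel.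
import Mathlib
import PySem

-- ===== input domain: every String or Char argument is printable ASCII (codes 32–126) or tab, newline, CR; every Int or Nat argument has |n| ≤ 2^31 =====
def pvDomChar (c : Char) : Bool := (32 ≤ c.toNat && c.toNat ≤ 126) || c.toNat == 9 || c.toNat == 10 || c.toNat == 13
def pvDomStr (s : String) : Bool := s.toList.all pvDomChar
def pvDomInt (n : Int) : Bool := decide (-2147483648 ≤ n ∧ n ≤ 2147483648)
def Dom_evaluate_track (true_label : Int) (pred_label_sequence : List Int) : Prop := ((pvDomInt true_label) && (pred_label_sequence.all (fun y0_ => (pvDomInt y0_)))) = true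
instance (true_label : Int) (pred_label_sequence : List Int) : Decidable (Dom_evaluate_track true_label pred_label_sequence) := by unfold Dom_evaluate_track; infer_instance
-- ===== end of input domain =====

-- B replaces A's forward scan + second forward search by one reverse scan with early exit
-- and the single expression last_error + 2 (simpler decomposition; same return value).

-- ===== PORT A =====
-- Python A's inner 'for i in range(last_error_idx+1, len): if xs[i]==t: first=i; break'
def firstCorrectA (t : Int) (xs : List Int) : List Int → Int
  | [] => -1
  | i :: rest => if PySem.List.pyGetD xs i 0 == t then i else firstCorrectA t xs rest

def evaluate_track (true_label : Int) (pred_label_sequence : List Int) : Int × Bool :=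
  let final_correct := ((PySem.List.pyGet? pred_label_sequence (-1)).getD 0 == true_label)
  let last_error_idx := (PySem.List.enumerate pred_label_sequence 0).foldl
    (fun acc ip => if ip.2 ≠ true_label then ip.1 else acc) (-1)
  let effective_point :=
    if last_error_idx = -1 then (1 : Int)
    else
      let first := firstCorrectA true_label pred_label_sequence
        (PySem.List.pyRange (last_error_idx + 1) (pred_label_sequence.length : Int) 1)
      if first ≠ -1 then first + 1 else (pred_label_sequence.length : Int) + 1
  (effective_point, final_correct)

-- ===== PORT B =====
-- B's 'for i, pred in reversed(list(enumerate(xs))): if pred != t: last_error = i; break'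
def lastErrB (t : Int) : List (Int × Int) → Int
  | [] => -1
  | ip :: rest => if ip.2 ≠ t then ip.1 else lastErrB t rest

def evaluate_track_alt (true_label : Int) (pred_label_sequence : List Int) : Int × Bool :=
  let final_correct := ((PySem.List.pyGet? pred_label_sequence (-1)).getD 0 == true_label)
  let last_error := lastErrB true_label (PySem.List.enumerate pred_label_sequence 0).reverse
  ((if last_error = -1 then 1 else last_error + 2), final_correct)

-- ===== PRECONDITION & SPEC =====
-- A raises IndexError on the empty list (pred_label_sequence[-1]); Pre_ excludes exactly that.
def Pre_evaluate_track (true_label : Int) (pred_label_sequence : List Int) : Prop :=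
  pred_label_sequence ≠ []
instance (true_label : Int) (pred_label_sequence : List Int) : Decidable (Pre_evaluate_track true_label pred_label_sequence) := by unfold Pre_evaluate_track; infer_instance

def pvWitness_evaluate_track : Int × List Int := (1, [1, 0, 1])

def Spec_evaluate_track (true_label : Int) (pred_label_sequence : List Int) (out : Int × Bool) : Prop := out = evaluate_track_alt true_label pred_label_sequence
instance (true_label : Int) (pred_label_sequence : List Int) (out : Int × Bool) : Decidable (Spec_evaluate_track true_label pred_label_sequence out) := by unfold Spec_evaluate_track; infer_instance

-- ===== CLAIM (what is proved, stated in full; the proofs are below) =====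
def Claim_equal_evaluate_track : Prop := ∀ (true_label : Int) (pred_label_sequence : List Int), Dom_evaluate_track true_label pred_label_sequence → Pre_evaluate_track true_label pred_label_sequence → Spec_evaluate_track true_label pred_label_sequence (evaluate_track true_label pred_label_sequence)

-- ===== LEMMAS AND PROOFS =====

-- A's forward select-the-last fold computes the same index as B's reverse first-hit scan
theorem foldl_eq_lastErr (t : Int) (l : List (Int × Int)) :
    l.foldl (fun acc ip => if ip.2 ≠ t then ip.1 else acc) (-1) = lastErrB t l.reverse := by
  induction l using List.reverseRecOn with
  | nil => rfl
  | append_singleton ds p ih =>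
      rw [List.foldl_append, List.reverse_append]
      simp only [List.foldl_cons, List.foldl_nil, List.reverse_cons, List.reverse_nil,
        List.nil_append, List.cons_append, lastErrB]
      by_cases hx : p.2 ≠ t
      · rw [if_pos hx, if_pos hx]
      · rw [if_neg hx, if_neg hx, ih]

-- Characterisation of the last-error index: bounds and maximality
theorem lastErr_spec (t : Int) (xs : List Int) :
    (lastErrB t (PySem.List.enumerate xs 0).reverse = -1 ∨
      (0 ≤ lastErrB t (PySem.List.enumerate xs 0).reverse ∧
       lastErrB t (PySem.List.enumerate xs 0).reverse < (xs.length : Int))) ∧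
    (∀ j : Nat, lastErrB t (PySem.List.enumerate xs 0).reverse < (j : Int) →
       j < xs.length → xs.getD j 0 = t) := by
  induction xs using List.reverseRecOn with
  | nil =>
      refine ⟨Or.inl rfl, ?_⟩
      intro j _ hj
      simp at hj
  | append_singleton ys x ih =>
      rw [PySem.List.enumerate_append]
      have hstep : lastErrB t ((PySem.List.enumerate ys 0 ++ PySem.List.enumerate [x] (0 + ys.length)).reverse)
          = if x ≠ t then (0 + (ys.length : Int)) else lastErrB t (PySem.List.enumerate ys 0).reverse := by
        rw [List.reverse_append]
        rfl
      rw [hstep]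
      by_cases hx : x ≠ t
      · -- the appended element x is wrong: it is the new last error
        rw [if_pos hx]
        refine ⟨Or.inr ⟨by omega, by simp [List.length_append]⟩, ?_⟩
        intro j h1 h2
        exfalso
        simp [List.length_append] at h2
        omega
      · -- x is correct: the last error (if any) lies in ys
        have hxe : x = t := of_not_not hx
        rw [if_neg hx]
        constructor
        · rcases ih.1 with h | ⟨ha, hb⟩
          · exact Or.inl h
          · refine Or.inr ⟨ha, ?_⟩
            simp only [List.length_append, List.length_cons, List.length_nil]
            push_cast
            omega
        · intro j h1 h2
          simp only [List.length_append, List.length_cons, List.length_nil] at h2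
          by_cases hj : j < ys.length
          · rw [List.getD_append _ _ _ _ hj]
            exact ih.2 j h1 hj
          · have hje : j = ys.length := by omega
            subst hje
            simp [List.getD_eq_getElem?_getD, hxe]

theorem evaluate_track_eq (t : Int) (xs : List Int) (_hne : xs ≠ []) :
    evaluate_track t xs = evaluate_track_alt t xs := by
  unfold evaluate_track evaluate_track_alt
  rw [foldl_eq_lastErr]
  set r := lastErrB t (PySem.List.enumerate xs 0).reverse with hr
  by_cases h1 : r = -1
  · simp [h1]
  · simp only [h1, if_false]
    have hspec := lastErr_spec t xs
    rw [← hr] at hspec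
    rcases hspec.1 with h | ⟨hr0, hrl⟩
    · exact absurd h h1
    have hmax := hspec.2
    by_cases h2 : r + 1 < (xs.length : Int)
    · -- range is nonempty; its first element r+1 is a correct point
      rw [PySem.List.pyRange_one_cons h2]
      have hcast : (((r + 1).toNat : Nat) : Int) = r + 1 := Int.toNat_of_nonneg (by omega)
      have hc : PySem.List.pyGetD xs (r + 1) 0 = t := by
        rw [← hcast, PySem.List.pyGetD_natCast]
        exact hmax (r + 1).toNat (by omega) (by omega)
      simp only [firstCorrectA, hc, beq_self_eq_true, if_pos]
      have h3 : r + 1 ≠ -1 := by omega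
      simp only [h3, ne_eq, not_false_iff, if_true, Prod.mk.injEq]
      exact ⟨by omega, trivial⟩
    · -- r is the last index: range empty, failure sentinel len+1 = r+2
      rw [PySem.List.pyRange_one_eq_nil (by omega)]
      simp only [firstCorrectA, ne_eq, not_true_eq_false, if_false, Prod.mk.injEq]
      exact ⟨by omega, trivial⟩

-- ===== VERDICT (by name: the statement is the Claim_ definition above) =====
theorem evaluate_track_spec : Claim_equal_evaluate_track := by
  intro t xs _ hpre
  unfold Spec_evaluate_track
  exact evaluate_track_eq t xs hpre
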